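-- pv_equiv track=rewrite | github.com/RETR0-OS/DSA_Practice_Generators | heaps_practice.py | build_heap_floyd
-- ===== SOURCE A (Python) =====
-- def _cmp(a, b, is_min):
--     """Return True if a should be above b in this heap type."""
--     return a < b if is_min else a > b
--
-- def _sift_down(arr, i, end, is_min):
--     """
--     Sift element at 1-based index i downward within arr[1..end].
--     Returns list of swap steps: (idx_a, idx_b, snapshot).
--     """
--     steps = []
--     while True:
--         target = i
--         l, r   = 2 * i, 2 * i + 1
--         if l <= end and _cmp(arr[l], arr[target], is_min):
--             target = l
--         if r <= end and _cmp(arr[r], arr[target], is_min):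
--             target = r
--         if target == i:
--             break
--         arr[i], arr[target] = arr[target], arr[i]
--         steps.append((i, target, list(arr)))
--         i = target
--     return steps
--
-- def build_heap_floyd(values, is_min):
--     """
--     Build a 1-indexed heap from a plain list of values using Floyd's algorithm.
--     arr[0] = None, real elements at arr[1..n].
--     Returns (heap_arr, all_steps).
--     """
--     arr = [None] + list(values)    # 1-based; index 0 unused
--     n   = len(arr) - 1
--     all_steps = []
--     for i in range(n // 2, 0, -1):
--         steps = _sift_down(arr, i, n, is_min)
--         all_steps.extend(steps)
--     return arr, all_steps
-- ===== SOURCE B (Python) =====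
-- def build_heap_floyd(values, is_min):
--     """Floyd heap build, purely functional: recursive sift returning fresh
--     snapshots, recursive descent over the internal nodes."""
--     def above(a, b):
--         return a < b if is_min else a > b
--
--     def sift(arr, i, end):
--         l, r = 2 * i, 2 * i + 1
--         t = i
--         if l <= end and above(arr[l], arr[t]):
--             t = l
--         if r <= end and above(arr[r], arr[t]):
--             t = r
--         if t == i:
--             return arr, []
--         arr2 = arr[:]
--         arr2[i], arr2[t] = arr2[t], arr2[i]
--         final_arr, rest = sift(arr2, t, end)
--         return final_arr, [(i, t, list(arr2))] + rest
--
--     def go(arr, i):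
--         if i == 0:
--             return arr, []
--         arr1, s = sift(arr, i, n)
--         arr2, rest = go(arr1, i - 1)
--         return arr2, s + rest
--
--     arr = [None] + list(values)
--     n = len(arr) - 1
--     return go(arr, n // 2)
-- ===== Notes on version B (the rewrite author's own statement) =====
-- stated objective: alternative
-- what changed: The in-place while-loop sift with a mutated shared array and an extended accumulator is replaced by a purely functional recursive sift that copies the array per swap and conses its step before recursing, with the outer range loop replaced by recursion over the internal-node index.
import Mathlib
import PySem

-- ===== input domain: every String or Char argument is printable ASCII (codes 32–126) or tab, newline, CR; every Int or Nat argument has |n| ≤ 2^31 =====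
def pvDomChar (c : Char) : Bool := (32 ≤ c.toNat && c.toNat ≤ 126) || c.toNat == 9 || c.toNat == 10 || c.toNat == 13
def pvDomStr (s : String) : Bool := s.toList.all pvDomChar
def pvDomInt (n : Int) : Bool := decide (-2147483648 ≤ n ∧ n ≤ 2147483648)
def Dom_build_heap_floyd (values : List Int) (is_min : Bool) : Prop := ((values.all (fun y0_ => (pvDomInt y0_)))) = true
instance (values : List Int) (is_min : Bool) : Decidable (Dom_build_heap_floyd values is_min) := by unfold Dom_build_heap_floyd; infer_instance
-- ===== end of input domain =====

-- B replaces A's in-place while-loop sift (mutated shared array, extended step accumulator)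
-- by a purely functional recursive sift (copy per swap, step consed before the recursive call)
-- and replaces the outer range loop by recursion over the internal-node index; return values agree.

-- ===== PORT A =====
-- _cmp(a, b, is_min); elements compared are always real values (some _), index 0 is never compared
def pvCmpA (a b : Option Int) (is_min : Bool) : Bool :=
  match a, b with
  | some a, some b => if is_min then a < b else a > b
  | _, _ => false

-- arr[i] (index always in range in A's calls; none would be Python's IndexError, unreachable)
def pvGetA (arr : List (Option Int)) (i : Int) : Option Int :=
  (PySem.List.pyGet? arr i).getD none

-- arr[i] = v (i always ≥ 1 at the call sites)
def pvSetA (arr : List (Option Int)) (i : Int) (v : Option Int) : List (Option Int) :=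
  arr.set i.toNat v

-- the `while True` loop of _sift_down, state (arr, i, steps); fuel only guards termination
def pvSiftA (fuel : Nat) (arr : List (Option Int)) (i e : Int) (is_min : Bool)
    (steps : List (Int × Int × List (Option Int))) :
    List (Option Int) × List (Int × Int × List (Option Int)) :=
  match fuel with
  | 0 => (arr, steps)
  | fuel + 1 =>
    let target := i
    let l := 2 * i
    let r := 2 * i + 1
    let target := if l ≤ e && pvCmpA (pvGetA arr l) (pvGetA arr target) is_min then l else target
    let target := if r ≤ e && pvCmpA (pvGetA arr r) (pvGetA arr target) is_min then r else target
    if target == i then (arr, steps)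
    else
      let arr' := pvSetA (pvSetA arr i (pvGetA arr target)) target (pvGetA arr i)
      pvSiftA fuel arr' target e is_min (steps ++ [(i, target, arr')])

def build_heap_floyd (values : List Int) (is_min : Bool) :
    List (Option Int) × (List (Int × Int × List (Option Int))) :=
  let arr : List (Option Int) := none :: values.map some
  let n : Int := (arr.length : Int) - 1
  (PySem.List.pyRange (PySem.Int.floordiv n 2) 0 (-1)).foldl
    (fun st i =>
      let p := pvSiftA arr.length st.1 i n is_min []
      (p.1, st.2 ++ p.2))
    (arr, [])

-- ===== PORT B =====
def pvAboveB (a b : Option Int) (is_min : Bool) : Bool :=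
  match a, b with
  | some a, some b => if is_min then a < b else a > b
  | _, _ => false

def pvGetB (arr : List (Option Int)) (i : Int) : Option Int :=
  (PySem.List.pyGet? arr i).getD none

-- recursive sift of Source B: copy, swap, cons the step, recurse; fuel only guards termination
def pvSiftB (fuel : Nat) (arr : List (Option Int)) (i e : Int) (is_min : Bool) :
    List (Option Int) × List (Int × Int × List (Option Int)) :=
  match fuel with
  | 0 => (arr, [])
  | fuel + 1 =>
    let l := 2 * i
    let r := 2 * i + 1
    let t := if l ≤ e && pvAboveB (pvGetB arr l) (pvGetB arr i) is_min then l else i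
    let t := if r ≤ e && pvAboveB (pvGetB arr r) (pvGetB arr t) is_min then r else t
    if t == i then (arr, [])
    else
      let arr2 := ((arr.set i.toNat (pvGetB arr t)).set t.toNat (pvGetB arr i))
      let p := pvSiftB fuel arr2 t e is_min
      (p.1, (i, t, arr2) :: p.2)

-- go(arr, i) of Source B: recursion over the internal-node index (i counts down to 0)
def pvGoB (fuel : Nat) (arr : List (Option Int)) (k : Nat) (e : Int) (is_min : Bool) :
    List (Option Int) × List (Int × Int × List (Option Int)) :=
  match k with
  | 0 => (arr, [])
  | k + 1 =>
    let p := pvSiftB fuel arr ((k + 1 : Nat) : Int) e is_min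
    let q := pvGoB fuel p.1 k e is_min
    (q.1, p.2 ++ q.2)

def build_heap_floyd_alt (values : List Int) (is_min : Bool) :
    List (Option Int) × (List (Int × Int × List (Option Int))) :=
  let arr : List (Option Int) := none :: values.map some
  let n : Int := (arr.length : Int) - 1
  pvGoB arr.length arr (PySem.Int.floordiv n 2).toNat n is_min

-- ===== PRECONDITION & SPEC =====
def Spec_build_heap_floyd (values : List Int) (is_min : Bool) (out : List (Option Int) × (List (Int × Int × List (Option Int)))) : Prop := out = build_heap_floyd_alt values is_min
instance (values : List Int) (is_min : Bool) (out : List (Option Int) × (List (Int × Int × List (Option Int)))) : Decidable (Spec_build_heap_floyd values is_min out) := by unfold Spec_build_heap_floyd; infer_instance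

-- ===== CLAIM (what is proved, stated in full; the proofs are below) =====
def Claim_equal_build_heap_floyd : Prop := ∀ (values : List Int) (is_min : Bool), Dom_build_heap_floyd values is_min → Spec_build_heap_floyd values is_min (build_heap_floyd values is_min)

-- ===== LEMMAS AND PROOFS =====

theorem pvCmp_eq (a b : Option Int) (m : Bool) : pvCmpA a b m = pvAboveB a b m := rfl

theorem pvGet_eq (arr : List (Option Int)) (i : Int) : pvGetA arr i = pvGetB arr i := rfl

-- A's loop with accumulator computes B's recursion with the steps appended after the accumulator
theorem pvSift_eq (fuel : Nat) :
    ∀ (arr : List (Option Int)) (i e : Int) (m : Bool)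
      (acc : List (Int × Int × List (Option Int))),
      pvSiftA fuel arr i e m acc =
        ((pvSiftB fuel arr i e m).1, acc ++ (pvSiftB fuel arr i e m).2) := by
  induction fuel with
  | zero => intro arr i e m acc; simp [pvSiftA, pvSiftB]
  | succ fuel ih =>
    intro arr i e m acc
    simp only [pvSiftA, pvSiftB, pvCmp_eq, pvGet_eq, pvSetA]
    split <;> split <;> simp [ih] <;> split <;> simp

-- A's foldl over range(k, 0, -1) computes B's go-recursion, appending after the accumulator
theorem pvBuild_eq (F : Nat) (e : Int) (m : Bool) (k : Nat) :
    ∀ (arr : List (Option Int)) (acc : List (Int × Int × List (Option Int))),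
      (PySem.List.pyRange (k : Int) 0 (-1)).foldl
        (fun st i =>
          let p := pvSiftA F st.1 i e m []
          (p.1, st.2 ++ p.2))
        (arr, acc) =
        ((pvGoB F arr k e m).1, acc ++ (pvGoB F arr k e m).2) := by
  induction k with
  | zero =>
    intro arr acc
    rw [PySem.List.pyRange_neg_one_eq_nil (by omega)]
    simp [pvGoB]
  | succ k ih =>
    intro arr acc
    have hstep :
        (let p := pvSiftA F ((arr, acc) :
              List (Option Int) × List (Int × Int × List (Option Int))).1
            ((k + 1 : Nat) : Int) e m [];
          (p.1, ((arr, acc) :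
              List (Option Int) × List (Int × Int × List (Option Int))).2 ++ p.2))
          = ((pvSiftB F arr ((k + 1 : Nat) : Int) e m).1,
             acc ++ (pvSiftB F arr ((k + 1 : Nat) : Int) e m).2) := by
      simp [pvSift_eq]
    rw [PySem.List.pyRange_neg_one_cons (by exact_mod_cast Nat.succ_pos k), List.foldl_cons,
      show ((k + 1 : Nat) : Int) - 1 = (k : Int) by push_cast; omega, hstep, ih]
    simp [pvGoB]

-- ===== VERDICT (by name: the statement is the Claim_ definition above) =====
theorem build_heap_floyd_spec : Claim_equal_build_heap_floyd := by
  intro values is_min _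
  unfold Spec_build_heap_floyd
  simp only [build_heap_floyd, build_heap_floyd_alt]
  have h0 : (0:Int) ≤ ((none :: values.map some : List (Option Int)).length : Int) - 1 := by
    simp
  have hnn : 0 ≤ PySem.Int.floordiv
      (((none :: values.map some : List (Option Int)).length : Int) - 1) 2 := by
    rw [PySem.Int.floordiv_eq_ediv_of_pos (by omega : (0:Int) < 2)]
    exact Int.ediv_nonneg h0 (by omega)
  conv_lhs => rw [← Int.toNat_of_nonneg hnn]
  rw [pvBuild_eq, List.nil_append]
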